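-- pv_equiv track=rewrite | github.com/YutaZhuo/FIND | data_util/datasets_H5.py | get_pairs_adj
-- ===== SOURCE A (Python) =====
-- def get_pairs_adj(data):
--     pairs = []
--     d1 = None
--     for d2 in data:
--         if d1 is None:
--             d1 = d2
--         else:
--             pairs.append((d1, d2))
--             pairs.append((d2, d1))
--             d1 = None
--     return pairs
-- ===== SOURCE B (Python) =====
-- def get_pairs_adj(data):
--     n = len(data) - len(data) % 2
--     return [(data[k], data[k + 1 - 2 * (k % 2)]) for k in range(n)]
-- ===== Notes on version B (the rewrite author's own statement) =====
-- stated objective: alternative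
-- what changed: Replaced A's sequential d1-is-None toggle state machine with a closed-form index-mapping comprehension: the output has exactly len(data)//2*2 entries and entry k is (data[k], data[k+1-2*(k%2)]), so the list is built by random access from an arithmetic index formula instead of by consuming the stream with carried state.
import Mathlib
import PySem

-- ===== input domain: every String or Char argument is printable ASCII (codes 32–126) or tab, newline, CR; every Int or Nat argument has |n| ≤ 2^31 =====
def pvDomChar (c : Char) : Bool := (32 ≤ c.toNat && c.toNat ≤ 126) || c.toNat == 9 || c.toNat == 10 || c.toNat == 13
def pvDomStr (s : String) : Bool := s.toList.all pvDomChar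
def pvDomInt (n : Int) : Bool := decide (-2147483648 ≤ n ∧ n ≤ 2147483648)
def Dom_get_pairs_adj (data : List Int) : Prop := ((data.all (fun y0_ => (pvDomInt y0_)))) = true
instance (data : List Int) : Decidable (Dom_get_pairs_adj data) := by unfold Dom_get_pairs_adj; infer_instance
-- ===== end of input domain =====

-- B replaces A's d1-is-None toggle state machine with a closed-form index-mapping comprehension (entry k of the output is (data[k], data[k+1-2*(k%2)])); alternative decomposition, same cost, no speed claim.


-- ===== PORT A =====
-- literal port of A: fold over data with state (pairs, d1 : Option Int)
def get_pairs_adj (data : List Int) : List (Int × Int) :=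
  (data.foldl
    (fun (st : List (Int × Int) × Option Int) d2 =>
      match st.2 with
      | none => (st.1, some d2)
      | some d1 => (st.1 ++ [(d1, d2), (d2, d1)], none))
    ([], none)).1

-- ===== PORT B =====
-- port of B: n = len(data) - len(data) % 2; [(data[k], data[k+1-2*(k%2)]) for k in range(n)]
-- (data[k] ported as PySem.List.pyGetD; every index generated is in range, so the default is never used)
def get_pairs_adj_alt (data : List Int) : List (Int × Int) :=
  let n : Int := PySem.List.len data - PySem.Int.mod (PySem.List.len data) 2
  (PySem.List.pyRange 0 n 1).map (fun k =>
    (PySem.List.pyGetD data k 0, PySem.List.pyGetD data (k + 1 - 2 * PySem.Int.mod k 2) 0))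

-- ===== PRECONDITION & SPEC =====
def Spec_get_pairs_adj (data : List Int) (out : List (Int × Int)) : Prop := out = get_pairs_adj_alt data
instance (data : List Int) (out : List (Int × Int)) : Decidable (Spec_get_pairs_adj data out) := by unfold Spec_get_pairs_adj; infer_instance

-- ===== CLAIM (what is proved, stated in full; the proofs are below) =====
def Claim_equal_get_pairs_adj : Prop := ∀ (data : List Int), Dom_get_pairs_adj data → Spec_get_pairs_adj data (get_pairs_adj data)

-- ===== LEMMAS AND PROOFS =====

-- two-at-a-time recursion: the common characterisation both ports are reduced to
def pvPairsRec : List Int → List (Int × Int)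
  | a :: b :: rest => (a, b) :: (b, a) :: pvPairsRec rest
  | _ => []

-- A's fold equals pvPairsRec
theorem pvA_eq_rec_aux (data : List Int) (acc : List (Int × Int)) :
    (data.foldl
      (fun (st : List (Int × Int) × Option Int) d2 =>
        match st.2 with
        | none => (st.1, some d2)
        | some d1 => (st.1 ++ [(d1, d2), (d2, d1)], none))
      (acc, none)).1 = acc ++ pvPairsRec data := by
  induction data using pvPairsRec.induct generalizing acc with
  | case1 a b rest ih =>
      simp [List.foldl, pvPairsRec, ih, List.append_assoc]
  | case2 l h =>
      match l with
      | [] => simp [pvPairsRec]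
      | [a] => simp [List.foldl, pvPairsRec]
      | a :: b :: rest => exact absurd rfl (h a b rest)

-- the Nat form of B's index comprehension equals pvPairsRec
theorem pvB_nat_aux (data : List Int) :
    (List.range (data.length - data.length % 2)).map (fun k : Nat =>
      (data.getD k 0, data.getD (k + 1 - 2 * (k % 2)) 0)) = pvPairsRec data := by
  induction data using pvPairsRec.induct with
  | case1 a b rest ih =>
      have hlen : (a :: b :: rest).length - (a :: b :: rest).length % 2
          = (rest.length - rest.length % 2) + 1 + 1 := by
        simp only [List.length_cons]; omega
      rw [hlen, List.range_succ_eq_map, List.range_succ_eq_map]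
      simp only [List.map_cons, List.map_map]
      simp only [pvPairsRec]
      rw [← ih]
      refine congrArg₂ _ ?_ (congrArg₂ _ ?_ ?_)
      · norm_num [List.getD]
      · norm_num [Function.comp, List.getD]
      · apply List.map_congr_left
        intro k _
        simp only [Function.comp, Nat.succ_eq_add_one]
        have h3 : k + 1 + 1 + 1 - 2 * ((k + 1 + 1) % 2) = (k + 1 - 2 * (k % 2)) + 1 + 1 := by
          rcases Nat.mod_two_eq_zero_or_one k with h | h <;> omega
        rw [h3]
        simp
  | case2 l h =>
      match l with
      | [] => simp [pvPairsRec]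
      | [a] => simp [pvPairsRec]
      | a :: b :: rest => exact absurd rfl (h a b rest)

-- B equals pvPairsRec
theorem pvB_eq_rec (data : List Int) : get_pairs_adj_alt data = pvPairsRec data := by
  simp only [get_pairs_adj_alt]
  rw [← pvB_nat_aux data]
  have hn : (PySem.List.len data - PySem.Int.mod (PySem.List.len data) 2)
      = ((data.length - data.length % 2 : Nat) : Int) := by
    have h2 : PySem.Int.mod ((data.length : Nat) : Int) 2 = ((data.length % 2 : Nat) : Int) := by
      exact_mod_cast PySem.Int.mod_natCast data.length 2
    simp only [PySem.List.len, h2]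
    omega
  rw [hn, PySem.List.pyRange_zero_natCast, List.map_map]
  apply List.map_congr_left
  intro k hk
  simp only [Function.comp]
  have hidx : ((k : Int) + 1 - 2 * PySem.Int.mod (k : Int) 2)
      = ((k + 1 - 2 * (k % 2) : Nat) : Int) := by
    have h2 : PySem.Int.mod ((k : Nat) : Int) 2 = ((k % 2 : Nat) : Int) := by
      exact_mod_cast PySem.Int.mod_natCast k 2
    rw [h2]
    rcases Nat.mod_two_eq_zero_or_one k with h | h <;> rw [h] <;> push_cast <;> omega
  rw [hidx, PySem.List.pyGetD_natCast, PySem.List.pyGetD_natCast]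

-- ===== VERDICT (by name: the statement is the Claim_ definition above) =====
theorem get_pairs_adj_spec : Claim_equal_get_pairs_adj := by
  intro data _
  unfold Spec_get_pairs_adj get_pairs_adj
  rw [pvB_eq_rec]
  simpa using pvA_eq_rec_aux data []
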